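-- pv_equiv track=rewrite | github.com/Dudnik-Denys/tasks | stepik_pygen_profy/profy_4/profy_4_1/profy_4_1_18.py | is_geometric
-- ===== SOURCE A (Python) =====
-- def is_geometric(sequence: list) -> str:
--     counter = 0
--     for x in range(len(sequence[:-1])):
--         if sequence[x + 1] == sequence[x] * 2:
--             counter += 1
--         else:
--             break
--     if counter == len(sequence) - 1:
--         return 'Геометрическая прогрессия'
--     return 'Не прогрессия'
-- ===== SOURCE B (Python) =====
-- def is_geometric(sequence: list) -> str:
--     if not sequence:
--         return 'Не прогрессия'
--     first = sequence[0]
--     if all(v == first * 2 ** i for i, v in enumerate(sequence)):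
--         return 'Геометрическая прогрессия'
--     return 'Не прогрессия'
-- ===== Notes on version B (the rewrite author's own statement) =====
-- stated objective: alternative
-- what changed: Replaces A's pairwise index loop with early break and counter comparison by a closed-form check: every element must equal the first element times 2**i at its position i.
import Mathlib
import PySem

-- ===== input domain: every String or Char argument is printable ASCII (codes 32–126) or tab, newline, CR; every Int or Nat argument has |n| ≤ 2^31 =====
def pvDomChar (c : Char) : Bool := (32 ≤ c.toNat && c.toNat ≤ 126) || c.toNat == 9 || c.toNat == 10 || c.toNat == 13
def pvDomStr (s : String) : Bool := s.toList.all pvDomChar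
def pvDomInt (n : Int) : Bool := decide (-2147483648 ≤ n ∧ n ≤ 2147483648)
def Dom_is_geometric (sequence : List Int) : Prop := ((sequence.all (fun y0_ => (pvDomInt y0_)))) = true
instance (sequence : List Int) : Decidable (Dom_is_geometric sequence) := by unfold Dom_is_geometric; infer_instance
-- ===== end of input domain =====

-- B checks the closed form seq[i] = seq[0] * 2^i at every position instead of
-- A's pairwise index loop counting matching adjacent pairs with an early break (objective: alternative).

-- ===== PORT A =====
-- the 'for x in range(...)' loop with its break: recursion over the index list, state = counter
def isGeoLoopA (seq : List Int) : List Int → Int → Int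
  | [], c => c
  | x :: xs, c =>
    if PySem.List.pyGet? seq (x + 1) = (PySem.List.pyGet? seq x).map (· * 2)
    then isGeoLoopA seq xs (c + 1) else c

def is_geometric (sequence : List Int) : String :=
  let counter := isGeoLoopA sequence
    (PySem.List.pyRange 0 ((PySem.List.slice sequence none (some (-1))).length : Int) 1) 0
  if counter = (sequence.length : Int) - 1 then "Геометрическая прогрессия"
  else "Не прогрессия"

-- ===== PORT B =====
-- enumerate's indices are ≥ 0, so '2 ** i' is ported exactly as 2 ^ i.toNat
def is_geometric_alt (sequence : List Int) : String :=
  match sequence with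
  | [] => "Не прогрессия"
  | first :: _ =>
    if (PySem.List.enumerate sequence).all (fun p => p.2 == first * 2 ^ p.1.toNat)
    then "Геометрическая прогрессия"
    else "Не прогрессия"

-- ===== PRECONDITION & SPEC =====
def Spec_is_geometric (sequence : List Int) (out : String) : Prop := out = is_geometric_alt sequence
instance (sequence : List Int) (out : String) : Decidable (Spec_is_geometric sequence out) := by unfold Spec_is_geometric; infer_instance

-- ===== CLAIM (what is proved, stated in full; the proofs are below) =====
def Claim_equal_is_geometric : Prop := ∀ (sequence : List Int), Dom_is_geometric sequence → Spec_is_geometric sequence (is_geometric sequence)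

-- ===== LEMMAS AND PROOFS =====

-- the doubling-chain property both programs decide
abbrev geomChain (seq : List Int) : Prop := List.IsChain (fun a b => b = a * 2) seq

def condA (seq : List Int) (x : Int) : Prop :=
  PySem.List.pyGet? seq (x + 1) = (PySem.List.pyGet? seq x).map (· * 2)

lemma loopA_eq_iff (seq : List Int) (idxs : List Int) (c : Int) :
    isGeoLoopA seq idxs c = c + idxs.length ↔ ∀ x ∈ idxs, condA seq x := by
  induction idxs generalizing c with
  | nil => simp [isGeoLoopA]
  | cons x xs ih =>
    simp only [isGeoLoopA, List.length_cons]
    split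
    · rename_i h
      constructor
      · intro he y hy
        rcases List.mem_cons.mp hy with rfl | hy'
        · exact h
        · exact (ih (c + 1)).mp (by push_cast at he ⊢; omega) y hy'
      · intro hall
        have := (ih (c + 1)).mpr (fun y hy => hall y (List.mem_cons_of_mem _ hy))
        push_cast at this ⊢; omega
    · rename_i h
      constructor
      · intro he; exfalso; push_cast at he; omega
      · intro hall; exact absurd (hall x (List.mem_cons_self)) h

lemma condA_iff (seq : List Int) (i : Nat) (h1 : i + 1 < seq.length) :
    condA seq (i : Int) ↔ seq[i + 1] = seq[i] * 2 := by
  unfold condA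
  have hc : ((i : Int) + 1) = ((i + 1 : Nat) : Int) := by push_cast; ring
  rw [hc, PySem.List.pyGet?_natCast, PySem.List.pyGet?_natCast]
  rw [List.getElem?_eq_getElem h1, List.getElem?_eq_getElem (by omega)]
  simp

lemma allcond_iff_chain (seq : List Int) :
    (∀ x ∈ PySem.List.pyRange 0 ((seq.length : Int) - 1) 1, condA seq x) ↔ geomChain seq := by
  rw [geomChain, List.isChain_iff_getElem]
  constructor
  · intro hall i hi
    have hx : (i : Int) ∈ PySem.List.pyRange 0 ((seq.length : Int) - 1) 1 := by
      rw [PySem.List.mem_pyRange_one]; omega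
    exact (condA_iff seq i hi).mp (hall _ hx)
  · intro hch x hx
    rw [PySem.List.mem_pyRange_one] at hx
    obtain ⟨h0, h1⟩ := hx
    have hx' : x = ((x.toNat : Nat) : Int) := by omega
    rw [hx']
    exact (condA_iff seq x.toNat (by omega)).mpr (hch x.toNat (by omega))

lemma A_nil : is_geometric [] = "Не прогрессия" := by decide

lemma A_char (seq : List Int) (hne : seq ≠ []) :
    is_geometric seq =
      if geomChain seq then "Геометрическая прогрессия" else "Не прогрессия" := by
  unfold is_geometric
  rw [PySem.List.slice_to_neg_one]
  have h1 : seq.length ≠ 0 := fun h => hne (List.eq_nil_of_length_eq_zero h)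
  have hdl : (seq.dropLast.length : Int) = (seq.length : Int) - 1 := by
    rw [List.length_dropLast]; omega
  rw [hdl]
  have hlr : ((PySem.List.pyRange 0 ((seq.length : Int) - 1) 1).length : Int)
      = (seq.length : Int) - 1 := by
    rw [PySem.List.length_pyRange_one]; omega
  by_cases hch : geomChain seq
  · have hc := (loopA_eq_iff seq (PySem.List.pyRange 0 ((seq.length : Int) - 1) 1) 0).mpr
      ((allcond_iff_chain seq).mpr hch)
    rw [if_pos (by omega), if_pos hch]
  · have hc : isGeoLoopA seq (PySem.List.pyRange 0 ((seq.length : Int) - 1) 1) 0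
        ≠ (seq.length : Int) - 1 := by
      intro he
      exact hch ((allcond_iff_chain seq).mp
        ((loopA_eq_iff seq _ 0).mp (by omega)))
    rw [if_neg hc, if_neg hch]

-- the closed form: chain of doublings ↔ every element is first * 2^index
lemma pow_iff_chain (h : Int) (t : List Int) :
    (∀ (k : Nat) (hk : k < (h :: t).length), (h :: t)[k] = h * 2 ^ k) ↔ geomChain (h :: t) := by
  rw [geomChain, List.isChain_iff_getElem]
  constructor
  · intro hall i hi
    have h1 := hall i (by omega)
    have h2 := hall (i + 1) (by omega)
    rw [h1, h2, pow_succ]; ring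
  · intro hch k hk
    induction k with
    | zero => simp
    | succ n ih =>
      have := hch n (by omega)
      rw [this, ih (by omega), pow_succ]; ring

lemma B_char (seq : List Int) (hne : seq ≠ []) :
    is_geometric_alt seq =
      if geomChain seq then "Геометрическая прогрессия" else "Не прогрессия" := by
  cases seq with
  | nil => exact absurd rfl hne
  | cons h t =>
    unfold is_geometric_alt
    dsimp only
    have hall : ((PySem.List.enumerate (h :: t) 0).all (fun p => p.2 == h * 2 ^ p.1.toNat))
        ↔ geomChain (h :: t) := by
      rw [← pow_iff_chain h t, List.all_eq_true]
      constructor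
      · intro hb k hk
        have hm : ((k : Int), (h :: t)[k]) ∈ PySem.List.enumerate (h :: t) 0 := by
          rw [PySem.List.mem_enumerate_iff]
          exact ⟨k, hk, by simp⟩
        have := hb _ hm
        simpa using this
      · intro hf p hp
        rw [PySem.List.mem_enumerate_iff] at hp
        obtain ⟨k, hk, rfl⟩ := hp
        simpa using hf k hk
    by_cases hch : geomChain (h :: t)
    · rw [if_pos (hall.mpr hch), if_pos hch]
    · rw [if_neg (fun he => hch (hall.mp he)), if_neg hch]

lemma B_nil : is_geometric_alt [] = "Не прогрессия" := by decide

-- ===== VERDICT (by name: the statement is the Claim_ definition above) =====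
theorem is_geometric_spec : Claim_equal_is_geometric := by
  intro seq _
  unfold Spec_is_geometric
  by_cases hne : seq = []
  · subst hne; rw [A_nil, B_nil]
  · rw [A_char seq hne, B_char seq hne]
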